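-- pv_equiv track=rewrite | github.com/dilrukshiperera367/Career-Studio-New | WorkforceOS/analytics/ai_analytics.py | _get_retention_recommendations
-- ===== SOURCE A (Python) =====
-- def _get_retention_recommendations(factors):
--     """Generate actionable retention recommendations based on risk factors."""
--     recommendations = []
--     risk_factors = [f['factor'] for f in factors if f['direction'] == 'risk']
--
--     if any('salary' in f.lower() for f in risk_factors):
--         recommendations.append('📊 Review compensation against market benchmarks')
--     if any('promotion' in f.lower() for f in risk_factors):
--         recommendations.append('🎯 Discuss career development and growth path')
--     if any('overtime' in f.lower() for f in risk_factors):
--         recommendations.append('⏰ Review workload and consider work-life balance interventions')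
--     if any('engagement' in f.lower() for f in risk_factors):
--         recommendations.append('💬 Schedule 1:1 to understand employee concerns')
--     if any('tenure' in f.lower() for f in risk_factors):
--         recommendations.append('🤝 Strengthen onboarding and mentorship programs')
--     if not recommendations:
--         recommendations.append('✅ Employee appears stable — maintain regular check-ins')
--
--     return recommendations
-- ===== SOURCE B (Python) =====
-- _RECS = [
--     ('salary', '\U0001F4CA Review compensation against market benchmarks'),
--     ('promotion', '\U0001F3AF Discuss career development and growth path'),
--     ('overtime', '\u23F0 Review workload and consider work-life balance interventions'),
--     ('engagement', '\U0001F4AC Schedule 1:1 to understand employee concerns'),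
--     ('tenure', '\U0001F91D Strengthen onboarding and mentorship programs'),
-- ]
--
--
-- def _get_retention_recommendations(factors):
--     """Generate actionable retention recommendations based on risk factors."""
--     matched = set()
--     for f in factors:
--         if f['direction'] == 'risk':
--             low = f['factor'].lower()
--             matched.update(k for k, _ in _RECS if k in low)
--     out = [msg for k, msg in _RECS if k in matched]
--     return out or ['\u2705 Employee appears stable \u2014 maintain regular check-ins']
-- ===== Notes on version B (the rewrite author's own statement) =====
-- stated objective: alternative
-- what changed: Replaces five separate any-scans of the risk-factor list (one per keyword) with a single pass that builds a set of matched keywords per risk factor, followed by a fixed-order emit pass over the keyword->recommendation table.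
import Mathlib
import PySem

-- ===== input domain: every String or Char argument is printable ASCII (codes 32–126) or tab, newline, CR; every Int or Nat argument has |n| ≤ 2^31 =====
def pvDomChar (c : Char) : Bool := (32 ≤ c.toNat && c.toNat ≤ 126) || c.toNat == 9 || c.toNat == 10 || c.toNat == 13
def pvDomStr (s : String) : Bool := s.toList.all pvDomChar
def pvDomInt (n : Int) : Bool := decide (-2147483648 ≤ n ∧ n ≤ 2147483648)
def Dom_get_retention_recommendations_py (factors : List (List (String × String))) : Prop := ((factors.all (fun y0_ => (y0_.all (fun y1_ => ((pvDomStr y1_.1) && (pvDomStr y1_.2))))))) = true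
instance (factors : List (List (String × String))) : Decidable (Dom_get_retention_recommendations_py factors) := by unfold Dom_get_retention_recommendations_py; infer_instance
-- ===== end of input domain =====

-- B replaces A's five repeated any-scans of the risk-factor list with one pass building a
-- set of matched keywords, then a fixed-order emit pass over a keyword→recommendation table.

-- ===== PORT A =====
def get_retention_recommendations_py (factors : List (List (String × String))) : List String :=
  let risk_factors : List String :=
    (factors.filter (fun f => PySem.Dict.getD (PySem.Dict.mk f) "direction" "" == "risk")).map
      (fun f => PySem.Dict.getD (PySem.Dict.mk f) "factor" "")
  let recommendations : List String := []
  let recommendations :=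
    if risk_factors.any (fun f => PySem.Str.isIn "salary" (PySem.Str.lower f)) then
      recommendations ++ ["📊 Review compensation against market benchmarks"] else recommendations
  let recommendations :=
    if risk_factors.any (fun f => PySem.Str.isIn "promotion" (PySem.Str.lower f)) then
      recommendations ++ ["🎯 Discuss career development and growth path"] else recommendations
  let recommendations :=
    if risk_factors.any (fun f => PySem.Str.isIn "overtime" (PySem.Str.lower f)) then
      recommendations ++ ["⏰ Review workload and consider work-life balance interventions"] else recommendations
  let recommendations :=
    if risk_factors.any (fun f => PySem.Str.isIn "engagement" (PySem.Str.lower f)) then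
      recommendations ++ ["💬 Schedule 1:1 to understand employee concerns"] else recommendations
  let recommendations :=
    if risk_factors.any (fun f => PySem.Str.isIn "tenure" (PySem.Str.lower f)) then
      recommendations ++ ["🤝 Strengthen onboarding and mentorship programs"] else recommendations
  let recommendations :=
    if recommendations.isEmpty then
      recommendations ++ ["✅ Employee appears stable — maintain regular check-ins"] else recommendations
  recommendations

-- ===== PORT B =====
-- keyword → recommendation table (the module constant _RECS of Source B)
def pvRecs : List (String × String) :=
  [("salary", "📊 Review compensation against market benchmarks"),
   ("promotion", "🎯 Discuss career development and growth path"),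
   ("overtime", "⏰ Review workload and consider work-life balance interventions"),
   ("engagement", "💬 Schedule 1:1 to understand employee concerns"),
   ("tenure", "🤝 Strengthen onboarding and mentorship programs")]

-- the loop body of Source B's single pass
def pvStep (acc : PySem.Set String) (f : List (String × String)) : PySem.Set String :=
  if PySem.Dict.getD (PySem.Dict.mk f) "direction" "" == "risk" then
    let low := PySem.Str.lower (PySem.Dict.getD (PySem.Dict.mk f) "factor" "")
    PySem.Set.update acc ((pvRecs.filter (fun kr => PySem.Str.isIn kr.1 low)).map (fun kr => kr.1))
  else acc

def get_retention_recommendations_py_alt (factors : List (List (String × String))) : List String :=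
  let matched : PySem.Set String := factors.foldl pvStep PySem.Set.empty
  let out : List String :=
    (pvRecs.filter (fun kr => PySem.Set.contains matched kr.1)).map (fun kr => kr.2)
  if out.isEmpty then ["✅ Employee appears stable — maintain regular check-ins"] else out

-- ===== PRECONDITION & SPEC =====
-- Pre_ excludes exactly the inputs where the Python raises KeyError: a dict without a
-- "direction" key, or a dict whose direction is "risk" but which lacks a "factor" key.
def Pre_get_retention_recommendations_py (factors : List (List (String × String))) : Prop :=
  ∀ f ∈ factors, (PySem.Dict.get? (PySem.Dict.mk f) "direction").isSome = true ∧
    (PySem.Dict.getD (PySem.Dict.mk f) "direction" "" = "risk" → (PySem.Dict.get? (PySem.Dict.mk f) "factor").isSome = true)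
instance (factors : List (List (String × String))) : Decidable (Pre_get_retention_recommendations_py factors) := by
  unfold Pre_get_retention_recommendations_py; infer_instance
def pvWitness_get_retention_recommendations_py : (List (List (String × String))) :=
  [[("direction", "risk"), ("factor", "Low Salary")], [("direction", "protective")]]
def Spec_get_retention_recommendations_py (factors : List (List (String × String))) (out : List String) : Prop := out = get_retention_recommendations_py_alt factors
instance (factors : List (List (String × String))) (out : List String) : Decidable (Spec_get_retention_recommendations_py factors out) := by unfold Spec_get_retention_recommendations_py; infer_instance

-- ===== CLAIM (what is proved, stated in full; the proofs are below) =====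
def Claim_equal_get_retention_recommendations_py : Prop := ∀ (factors : List (List (String × String))), Dom_get_retention_recommendations_py factors → Pre_get_retention_recommendations_py factors → Spec_get_retention_recommendations_py factors (get_retention_recommendations_py factors)

-- ===== LEMMAS AND PROOFS =====

lemma pv_contains_pvStep (k : String) (acc : PySem.Set String) (f : List (String × String)) :
    PySem.Set.contains (pvStep acc f) k =
      (PySem.Set.contains acc k ||
        ((PySem.Dict.getD (PySem.Dict.mk f) "direction" "" == "risk") &&
          (decide (k ∈ pvRecs.map Prod.fst) &&
            PySem.Str.isIn k (PySem.Str.lower (PySem.Dict.getD (PySem.Dict.mk f) "factor" ""))))) := by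
  unfold pvStep
  split_ifs with h
  · rw [Bool.eq_iff_iff]
    simp [h, PySem.Set.update_eq_append_filter, List.mem_filter, List.mem_map]
    tauto
  · simp [h]

lemma pv_contains_foldl (k : String) (fs : List (List (String × String)))
    (acc : PySem.Set String) :
    PySem.Set.contains (fs.foldl pvStep acc) k =
      (PySem.Set.contains acc k ||
        (decide (k ∈ pvRecs.map Prod.fst) &&
          ((fs.filter (fun f => PySem.Dict.getD (PySem.Dict.mk f) "direction" "" == "risk")).map
              (fun f => PySem.Dict.getD (PySem.Dict.mk f) "factor" "")).any
            (fun f => PySem.Str.isIn k (PySem.Str.lower f)))) := by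
  induction fs generalizing acc with
  | nil => simp
  | cons hd tl ih =>
    rw [List.foldl_cons, ih, pv_contains_pvStep]
    by_cases h : (PySem.Dict.getD (PySem.Dict.mk hd) "direction" "" == "risk") = true
    · simp only [List.filter_cons, h, if_pos, List.map_cons, List.any_cons]
      cases hb : decide (k ∈ pvRecs.map Prod.fst) <;> simp [Bool.or_assoc]
    · simp only [List.filter_cons, Bool.not_eq_true] at *
      simp [h]

lemma pv_contains_matched (k : String) (hk : k ∈ pvRecs.map Prod.fst)
    (factors : List (List (String × String))) :
    PySem.Set.contains (factors.foldl pvStep PySem.Set.empty) k =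
      ((factors.filter (fun f => PySem.Dict.getD (PySem.Dict.mk f) "direction" "" == "risk")).map
          (fun f => PySem.Dict.getD (PySem.Dict.mk f) "factor" "")).any
        (fun f => PySem.Str.isIn k (PySem.Str.lower f)) := by
  rw [pv_contains_foldl]
  simp [hk, PySem.Set.empty]

-- ===== VERDICT (by name: the statement is the Claim_ definition above) =====
theorem get_retention_recommendations_py_spec : Claim_equal_get_retention_recommendations_py := by
  intro factors _ _
  unfold Spec_get_retention_recommendations_py
  unfold get_retention_recommendations_py get_retention_recommendations_py_alt
  dsimp only
  rw [show ((pvRecs.filter (fun kr =>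
        PySem.Set.contains (factors.foldl pvStep PySem.Set.empty) kr.1)).map (fun kr => kr.2)) =
      (pvRecs.filter (fun kr =>
        ((factors.filter (fun f => PySem.Dict.getD (PySem.Dict.mk f) "direction" "" == "risk")).map
            (fun f => PySem.Dict.getD (PySem.Dict.mk f) "factor" "")).any
          (fun f => PySem.Str.isIn kr.1 (PySem.Str.lower f)))).map (fun kr => kr.2) from by
    congr 1
    apply List.filter_congr
    intro kr hkr
    exact pv_contains_matched kr.1 (List.mem_map_of_mem hkr) factors]
  simp only [pvRecs, List.filter_cons, List.filter_nil]
  generalize ((factors.filter (fun f => PySem.Dict.getD (PySem.Dict.mk f) "direction" "" == "risk")).map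
      (fun f => PySem.Dict.getD (PySem.Dict.mk f) "factor" "")) = risk
  cases h1 : risk.any (fun f => PySem.Str.isIn "salary" (PySem.Str.lower f)) <;>
  cases h2 : risk.any (fun f => PySem.Str.isIn "promotion" (PySem.Str.lower f)) <;>
  cases h3 : risk.any (fun f => PySem.Str.isIn "overtime" (PySem.Str.lower f)) <;>
  cases h4 : risk.any (fun f => PySem.Str.isIn "engagement" (PySem.Str.lower f)) <;>
  cases h5 : risk.any (fun f => PySem.Str.isIn "tenure" (PySem.Str.lower f)) <;>
  simp
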